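-- pv_equiv track=rewrite | github.com/c-lombardo/aoc-2021 | Day 3/day3.py | cull_co2_list_on_bit_idx
-- ===== SOURCE A (Python) =====
-- def cull_co2_list_on_bit_idx(bit_idx, co2_list):
-- 	one_count = 0
-- 	for num in co2_list:
-- 		if num[bit_idx] == "1":
-- 			one_count += 1
-- 	popular = "1"
-- 	if one_count < len(co2_list)/2:
-- 		popular = "0"
--
-- 	to_return = []
-- 	for num in co2_list:
-- 		if num[bit_idx] != popular:
-- 			to_return.append(num)
-- 	return to_return
-- ===== SOURCE B (Python) =====
-- def cull_co2_list_on_bit_idx(bit_idx, co2_list):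
-- 	not_one = []
-- 	not_zero = []
-- 	one_count = 0
-- 	for num in co2_list:
-- 		c = num[bit_idx]
-- 		if c == "1":
-- 			one_count += 1
-- 		else:
-- 			not_one.append(num)
-- 		if c != "0":
-- 			not_zero.append(num)
-- 	if one_count < len(co2_list)/2:
-- 		return not_zero
-- 	return not_one
-- ===== Notes on version B (the rewrite author's own statement) =====
-- stated objective: alternative
-- what changed: Replaces A's count-pass followed by a separate filter-pass with a single partition pass that builds both candidate result lists (chars != '1' and chars != '0') while counting ones, then selects one of them.
import Mathlib
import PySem

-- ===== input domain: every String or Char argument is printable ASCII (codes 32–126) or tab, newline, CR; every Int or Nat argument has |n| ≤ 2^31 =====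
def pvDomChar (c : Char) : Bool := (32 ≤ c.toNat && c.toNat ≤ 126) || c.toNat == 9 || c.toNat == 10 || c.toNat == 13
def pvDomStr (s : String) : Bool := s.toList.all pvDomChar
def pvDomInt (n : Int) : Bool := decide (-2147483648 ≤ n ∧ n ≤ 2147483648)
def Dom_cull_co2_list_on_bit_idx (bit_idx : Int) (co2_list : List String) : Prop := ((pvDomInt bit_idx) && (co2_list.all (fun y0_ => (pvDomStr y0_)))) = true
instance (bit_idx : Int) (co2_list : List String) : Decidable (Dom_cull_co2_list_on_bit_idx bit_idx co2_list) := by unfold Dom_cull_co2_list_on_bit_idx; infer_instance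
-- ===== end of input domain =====

-- ===== PORT A =====
-- B replaces A's count-pass + filter-pass with one partition pass; proved equal on Pre_ (index in range).
-- Python's 'one_count < len(co2_list)/2' (true float division) equals '2*one_count < len' exactly for these ints.
def cull_co2_list_on_bit_idx (bit_idx : Int) (co2_list : List String) : List String :=
  let one_count : Int := co2_list.foldl
    (fun c num => if PySem.Str.pyGet? num bit_idx = some '1' then c + 1 else c) 0
  let popular : Char := if 2 * one_count < (co2_list.length : Int) then '0' else '1'
  co2_list.foldl
    (fun acc num => if PySem.Str.pyGet? num bit_idx ≠ some popular then acc ++ [num] else acc) []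

-- ===== PORT B =====
-- loop body of Source B's single pass (state: not_one, not_zero, one_count)
def altStep (bit_idx : Int) (st : List String × List String × Int) (num : String) :
    List String × List String × Int :=
  let c := PySem.Str.pyGet? num bit_idx
  let st1 := if c = some '1' then (st.1, st.2.1, st.2.2 + 1)
             else (st.1 ++ [num], st.2.1, st.2.2)
  if c ≠ some '0' then (st1.1, st1.2.1 ++ [num], st1.2.2) else st1

def cull_co2_list_on_bit_idx_alt (bit_idx : Int) (co2_list : List String) : List String :=
  let st := co2_list.foldl (altStep bit_idx) ([], [], 0)
  if 2 * st.2.2 < (co2_list.length : Int) then st.2.1 else st.1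

-- ===== PRECONDITION & SPEC =====
-- Pre_: num[bit_idx] must be in range for every string (else Python A raises IndexError).
def Pre_cull_co2_list_on_bit_idx (bit_idx : Int) (co2_list : List String) : Prop :=
  ∀ s ∈ co2_list, PySem.Raise.InRange s.toList.length bit_idx
instance (bit_idx : Int) (co2_list : List String) : Decidable (Pre_cull_co2_list_on_bit_idx bit_idx co2_list) := by unfold Pre_cull_co2_list_on_bit_idx; infer_instance
def pvWitness_cull_co2_list_on_bit_idx : Int × List String := (0, ["10", "01", "11"])
def Spec_cull_co2_list_on_bit_idx (bit_idx : Int) (co2_list : List String) (out : List String) : Prop := out = cull_co2_list_on_bit_idx_alt bit_idx co2_list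
instance (bit_idx : Int) (co2_list : List String) (out : List String) : Decidable (Spec_cull_co2_list_on_bit_idx bit_idx co2_list out) := by unfold Spec_cull_co2_list_on_bit_idx; infer_instance

-- ===== CLAIM (what is proved, stated in full; the proofs are below) =====
def Claim_equal_cull_co2_list_on_bit_idx : Prop := ∀ (bit_idx : Int) (co2_list : List String), Dom_cull_co2_list_on_bit_idx bit_idx co2_list → Pre_cull_co2_list_on_bit_idx bit_idx co2_list → Spec_cull_co2_list_on_bit_idx bit_idx co2_list (cull_co2_list_on_bit_idx bit_idx co2_list)

-- ===== LEMMAS AND PROOFS =====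
theorem count_fold (bit_idx : Int) (l : List String) (c : Int) :
    l.foldl (fun c num => if PySem.Str.pyGet? num bit_idx = some '1' then c + 1 else c) c
      = c + (l.filter (fun s => decide (PySem.Str.pyGet? s bit_idx = some '1'))).length := by
  induction l generalizing c with
  | nil => simp
  | cons x xs ih =>
    rw [List.foldl_cons]
    by_cases h : PySem.Str.pyGet? x bit_idx = some '1'
    · rw [if_pos h, ih, List.filter_cons_of_pos (by simpa using h)]
      simp only [List.length_cons, Nat.cast_add, Nat.cast_one]
      ring
    · rw [if_neg h, ih, List.filter_cons_of_neg (by simpa using h)]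

theorem A_filter (bit_idx : Int) (popular : Char) (l : List String) :
    l.foldl (fun acc num => if PySem.Str.pyGet? num bit_idx ≠ some popular then acc ++ [num] else acc) []
      = l.filter (fun s => decide (¬ PySem.Str.pyGet? s bit_idx = some popular)) := by
  rw [PySem.List.foldl_append_ite_eq_filter]
  simp

theorem alt_fold (bit_idx : Int) (l : List String) (n0 n1 : List String) (c : Int) :
    l.foldl (altStep bit_idx) (n0, n1, c)
      = (n0 ++ l.filter (fun s => decide (¬ PySem.Str.pyGet? s bit_idx = some '1')),
         n1 ++ l.filter (fun s => decide (¬ PySem.Str.pyGet? s bit_idx = some '0')),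
         c + (l.filter (fun s => decide (PySem.Str.pyGet? s bit_idx = some '1'))).length) := by
  induction l generalizing n0 n1 c with
  | nil => simp
  | cons x xs ih =>
    rw [List.foldl_cons]
    by_cases h1 : PySem.Str.pyGet? x bit_idx = some '1'
    · have h0 : PySem.Str.pyGet? x bit_idx ≠ some '0' := by rw [h1]; decide
      have hs : altStep bit_idx (n0, n1, c) x = (n0, n1 ++ [x], c + 1) := by
        simp only [altStep, if_pos h1, if_pos h0]
      rw [hs, ih, List.filter_cons_of_neg (by simpa using h1),
          List.filter_cons_of_pos (by simpa using h0),
          List.filter_cons_of_pos (by simpa using h1)]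
      simp only [Prod.mk.injEq, List.length_cons, Nat.cast_add, Nat.cast_one,
        List.append_assoc, List.singleton_append]
      exact ⟨trivial, trivial, by ring⟩
    · by_cases h0 : PySem.Str.pyGet? x bit_idx = some '0'
      · have h0' : ¬ PySem.Str.pyGet? x bit_idx ≠ some '0' := fun hq => hq h0
        have hs : altStep bit_idx (n0, n1, c) x = (n0 ++ [x], n1, c) := by
          simp only [altStep, if_neg h1, if_neg h0']
        rw [hs, ih, List.filter_cons_of_pos (by simpa using h1),
            List.filter_cons_of_neg (by simpa using h0),
            List.filter_cons_of_neg (by simpa using h1)]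
        simp [List.append_assoc]
      · have h0' : PySem.Str.pyGet? x bit_idx ≠ some '0' := h0
        have hs : altStep bit_idx (n0, n1, c) x = (n0 ++ [x], n1 ++ [x], c) := by
          simp only [altStep, if_neg h1, if_pos h0']
        rw [hs, ih, List.filter_cons_of_pos (by simpa using h1),
            List.filter_cons_of_pos (by simpa using h0'),
            List.filter_cons_of_neg (by simpa using h1)]
        simp [List.append_assoc]

-- ===== VERDICT (by name: the statement is the Claim_ definition above) =====
theorem cull_co2_list_on_bit_idx_spec : Claim_equal_cull_co2_list_on_bit_idx := by
  intro bit_idx co2_list _ _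
  unfold Spec_cull_co2_list_on_bit_idx cull_co2_list_on_bit_idx cull_co2_list_on_bit_idx_alt
  rw [alt_fold]
  have hcount := count_fold bit_idx co2_list 0
  simp only [hcount, A_filter, List.nil_append]
  by_cases h : 2 * ((0 : Int) + ((co2_list.filter (fun s => decide (PySem.Str.pyGet? s bit_idx = some '1'))).length : Int)) < (co2_list.length : Int)
  · simp only [if_pos h]
  · simp only [if_neg h]
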